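-- pv_equiv track=rewrite | github.com/deeksha-dwarak/inf113_hw6challenge | solution/app_secure.py | _safe_tokenize
-- ===== SOURCE A (Python) =====
-- from typing import Dict, List
--
-- ROMAN_VALUES: Dict[str, int] = {
--     "I": 1,
--     "V": 5,
--     "X": 10,
--     "L": 50,
--     "C": 100,
--     "D": 500,
--     "M": 1000,
-- }
--
-- class InvoiceFormatError(ValueError):
--     """Raised when an invoice expression cannot be processed safely."""
--
-- def _safe_tokenize(expr: str) -> List[str]:
--     """
--     Tokenize an expression while rejecting any illegal characters.
--
--     Allowed tokens:
--     - '+' or '-'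
--     - integer runs (e.g., "123")
--     - roman runs (e.g., "MCMXCIV") consisting only of IVXLCDM letters
--     - whitespace is ignored
--
--     Hardening:
--     - Reject overly long expressions
--     - Reject excessive token counts
--     """
--     # Basic hardening to reject extremely large inputs early
--     if len(expr) > 5000:
--         raise InvoiceFormatError("Expression too long")
--
--     tokens: List[str] = []
--     i = 0
--
--     while i < len(expr):
--         ch = expr[i]
--
--         if ch.isspace():
--             i += 1
--             continue
--
--         if ch in "+-":
--             tokens.append(ch)
--             i += 1
--             continue
--
--         if ch.isdigit():
--             j = i
--             while j < len(expr) and expr[j].isdigit():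
--                 j += 1
--             tokens.append(expr[i:j])
--             i = j
--             continue
--
--         up = ch.upper()
--         if up in ROMAN_VALUES:
--             j = i
--             while j < len(expr) and expr[j].upper() in ROMAN_VALUES:
--                 j += 1
--             tokens.append(expr[i:j].upper())
--             i = j
--             continue
--
--         # Anything else is illegal (core security requirement)
--         raise InvoiceFormatError(f"Illegal character in expression: {ch}")
--
--     # Empty after trimming whitespace is not allowed
--     if not tokens:
--         raise InvoiceFormatError("Empty expression")
--
--     # Token-count hardening (your tests use 2000 roman tokens joined by '+')
--     if len(tokens) > 2000:
--         raise InvoiceFormatError("Too many tokens")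
--
--     return tokens
-- ===== SOURCE B (Python) =====
-- from typing import Dict, List
--
-- ROMAN_VALUES: Dict[str, int] = {
--     "I": 1, "V": 5, "X": 10, "L": 50, "C": 100, "D": 500, "M": 1000,
-- }
--
-- class InvoiceFormatError(ValueError):
--     """Raised when an invoice expression cannot be processed safely."""
--
-- def _safe_tokenize(expr: str) -> List[str]:
--     """Single-pass state-machine tokenizer: classify each character once and
--     flush the pending run on every class change (no index arithmetic, no
--     inner scanning loops)."""
--     if len(expr) > 5000:
--         raise InvoiceFormatError("Expression too long")
--
--     tokens: List[str] = []
--     pending = None  # (kind, text): kind is 'd' (digit run) or 'r' (roman run)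
--
--     for ch in expr:
--         if ch.isspace():
--             kind = None
--         elif ch in "+-":
--             kind = None
--         elif ch.isdigit():
--             kind = 'd'
--         elif ch.upper() in ROMAN_VALUES:
--             kind = 'r'
--         else:
--             raise InvoiceFormatError(f"Illegal character in expression: {ch}")
--
--         if pending is not None and pending[0] != kind:
--             tokens.append(pending[1])
--             pending = None
--
--         if kind is None:
--             if not ch.isspace():
--                 tokens.append(ch)
--         else:
--             piece = ch if kind == 'd' else ch.upper()
--             pending = (kind, piece) if pending is None else (kind, pending[1] + piece)
--
--     if pending is not None:
--         tokens.append(pending[1])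
--
--     if not tokens:
--         raise InvoiceFormatError("Empty expression")
--     if len(tokens) > 2000:
--         raise InvoiceFormatError("Too many tokens")
--     return tokens
-- ===== Notes on version B (the rewrite author's own statement) =====
-- stated objective: alternative
-- what changed: Replaced A's index-based scanner, whose inner while-loops re-scan ahead to collect each digit/roman run, by a single-pass state-machine fold that classifies each character once and flushes the pending run whenever the character class changes.
import Mathlib
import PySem

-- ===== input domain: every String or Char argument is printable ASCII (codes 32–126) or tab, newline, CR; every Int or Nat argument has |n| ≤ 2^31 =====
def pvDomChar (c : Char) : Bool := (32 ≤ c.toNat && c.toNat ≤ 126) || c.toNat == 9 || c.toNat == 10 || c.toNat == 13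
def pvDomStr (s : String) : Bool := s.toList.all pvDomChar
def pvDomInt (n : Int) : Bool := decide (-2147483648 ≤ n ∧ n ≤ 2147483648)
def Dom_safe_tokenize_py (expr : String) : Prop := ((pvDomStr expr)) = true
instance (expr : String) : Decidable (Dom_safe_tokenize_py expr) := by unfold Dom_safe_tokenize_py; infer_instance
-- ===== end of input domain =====

-- B replaces A's index scanner with inner run-collecting while-loops by a single-pass
-- state-machine fold (classify each character once, flush the pending run on class change);
-- objective: alternative. Equivalence of the RETURN value is proved; where A raises,
-- both ports return [] and Pre_ excludes those inputs.


-- ===== PORT A =====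
-- shared character tests (both Pythons contain these literal tests)
def pvRomanKeys : List Char := ['I', 'V', 'X', 'L', 'C', 'D', 'M']   -- keys of ROMAN_VALUES

def pvIsOp (c : Char) : Bool := c == '+' || c == '-'                 -- ch in "+-"

def pvIsRoman (c : Char) : Bool := pvRomanKeys.contains (PySem.Chars.upperChar c)  -- ch.upper() in ROMAN_VALUES

-- the while-loop of A, step for step: skip spaces, emit ops, consume maximal digit/roman
-- runs (the inner `while j < len and …: j += 1` is the takeWhile/dropWhile split);
-- `none` = InvoiceFormatError (illegal character)
def pvTokA : List Char → Option (List String)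
  | [] => some []
  | c :: rest =>
    if PySem.Chars.isspace c then pvTokA rest
    else if pvIsOp c then (pvTokA rest).map (String.ofList [c] :: ·)
    else if PySem.Chars.isdigit c then
      (pvTokA (rest.dropWhile PySem.Chars.isdigit)).map
        (String.ofList (c :: rest.takeWhile PySem.Chars.isdigit) :: ·)
    else if pvIsRoman c then
      (pvTokA (rest.dropWhile pvIsRoman)).map
        (String.ofList ((c :: rest.takeWhile pvIsRoman).map PySem.Chars.upperChar) :: ·)
    else none
termination_by cs => cs.length
decreasing_by
  · simp
  · simp
  · have := List.length_dropWhile_le PySem.Chars.isdigit rest; simp; omega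
  · have := List.length_dropWhile_le pvIsRoman rest; simp; omega

-- A raises InvoiceFormatError on: too-long input, illegal character, empty token list,
-- too many tokens; the port returns [] there (all excluded by Pre_).
def safe_tokenize_py (expr : String) : List String :=
  if PySem.Str.len expr > 5000 then []                    -- raise "Expression too long"
  else
    match pvTokA expr.toList with
    | none => []                                          -- raise "Illegal character …"
    | some tokens =>
      if tokens = [] then []                              -- raise "Empty expression"
      else if tokens.length > 2000 then []                -- raise "Too many tokens"
      else tokens

-- ===== PORT B =====
-- character class: none = illegal (raise); some none = space/op (no run);
-- some (some true) = digit run, some (some false) = roman run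
def pvKindOf (c : Char) : Option (Option Bool) :=
  if PySem.Chars.isspace c then some none
  else if pvIsOp c then some none
  else if PySem.Chars.isdigit c then some (some true)
  else if pvIsRoman c then some (some false)
  else none

def pvPiece (k : Bool) (c : Char) : Char := if k then c else PySem.Chars.upperChar c

-- one iteration of B's for-loop; state: none = raised, some (tokens, pending run)
def pvStepB (st : Option (List String × Option (Bool × List Char))) (c : Char) :
    Option (List String × Option (Bool × List Char)) :=
  match st with
  | none => none
  | some (tokens, pending) =>
    match pvKindOf c with
    | none => none
    | some kd =>
      let p :=
        match pending with
        | some (pk, run) =>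
          if kd = some pk then (tokens, some (pk, run)) else (tokens ++ [String.ofList run], none)
        | none => (tokens, (none : Option (Bool × List Char)))
      match kd, p with
      | none, (tokens, pending) =>
        if PySem.Chars.isspace c then some (tokens, pending)
        else some (tokens ++ [String.ofList [c]], pending)
      | some k, (tokens, none) => some (tokens, some (k, [pvPiece k c]))
      | some k, (tokens, some (pk, run)) => some (tokens, some (pk, run ++ [pvPiece k c]))

-- the final `if pending is not None: tokens.append(pending[1])`
def pvFlush : Option (List String × Option (Bool × List Char)) → Option (List String)
  | none => none
  | some (tokens, none) => some tokens
  | some (tokens, some (_, run)) => some (tokens ++ [String.ofList run])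

def safe_tokenize_py_alt (expr : String) : List String :=
  if PySem.Str.len expr > 5000 then []                    -- raise "Expression too long"
  else
    match pvFlush (expr.toList.foldl pvStepB (some ([], none))) with
    | none => []                                          -- raise "Illegal character …"
    | some tokens =>
      if tokens = [] then []                              -- raise "Empty expression"
      else if tokens.length > 2000 then []                -- raise "Too many tokens"
      else tokens

-- ===== PRECONDITION & SPEC =====
def pvLegal (c : Char) : Bool :=
  PySem.Chars.isspace c || pvIsOp c || PySem.Chars.isdigit c || pvIsRoman c

-- number of tokens, read off the string directly: each op character is a token, and a
-- digit/roman character whose predecessor (if any) is not of the same run class starts one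
def pvStarts (cs : List Char) : Nat :=
  (((none :: cs.map some).zip cs).countP fun pc =>
    pvIsOp pc.2
    || (PySem.Chars.isdigit pc.2 && !(pc.1.elim false PySem.Chars.isdigit))
    || (pvIsRoman pc.2 && !(pc.1.elim false pvIsRoman)))

-- Pre_ excludes exactly the inputs on which A raises InvoiceFormatError: expressions longer
-- than 5000 chars, an illegal character, no token at all, or more than 2000 tokens.
def Pre_safe_tokenize_py (expr : String) : Prop :=
  expr.toList.length ≤ 5000 ∧ expr.toList.all pvLegal = true ∧
    1 ≤ pvStarts expr.toList ∧ pvStarts expr.toList ≤ 2000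

instance (expr : String) : Decidable (Pre_safe_tokenize_py expr) := by
  unfold Pre_safe_tokenize_py; infer_instance

def pvWitness_safe_tokenize_py : String := "xiv + 12 - M"

def Spec_safe_tokenize_py (expr : String) (out : List String) : Prop := out = safe_tokenize_py_alt expr
instance (expr : String) (out : List String) : Decidable (Spec_safe_tokenize_py expr out) := by unfold Spec_safe_tokenize_py; infer_instance

-- ===== CLAIM (what is proved, stated in full; the proofs are below) =====
def Claim_equal_safe_tokenize_py : Prop := ∀ (expr : String), Dom_safe_tokenize_py expr → Pre_safe_tokenize_py expr → Spec_safe_tokenize_py expr (safe_tokenize_py expr)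

-- ===== LEMMAS AND PROOFS =====
def pvPred (k : Bool) (c : Char) : Bool := if k then PySem.Chars.isdigit c else pvIsRoman c

theorem pvPred_true : pvPred true = PySem.Chars.isdigit := funext fun _ => rfl
theorem pvPred_false : pvPred false = pvIsRoman := funext fun _ => rfl
theorem pvPiece_true : pvPiece true = fun c => c := funext fun _ => rfl
theorem pvPiece_false : pvPiece false = PySem.Chars.upperChar := funext fun _ => rfl

theorem pvFoldl_none (cs : List Char) : cs.foldl pvStepB none = none := by
  induction cs with
  | nil => rfl
  | cons c cs ih => simpa [pvStepB] using ih

theorem pvIsDigit_not_space {c : Char} (h : PySem.Chars.isdigit c = true) :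
    PySem.Chars.isspace c = false := by
  simp [PySem.Chars.isdigit, Char.le_def, UInt32.le_iff_toNat_le] at h
  simp [PySem.Chars.isspace]
  omega

theorem pvIsDigit_not_op {c : Char} (h : PySem.Chars.isdigit c = true) :
    pvIsOp c = false := by
  by_contra hop
  have hop' : c = '+' ∨ c = '-' := by
    simpa [pvIsOp] using (Bool.not_eq_false (pvIsOp c)).mp hop
  rcases hop' with rfl | rfl <;> exact absurd h (by decide)

theorem pvIsRoman_cases {c : Char} (h : pvIsRoman c = true) :
    PySem.Chars.isspace c = false ∧ pvIsOp c = false ∧ PySem.Chars.isdigit c = false := by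
  by_cases hl : PySem.Chars.islower c = true
  · have hl' : 97 ≤ c.toNat ∧ c.toNat ≤ 122 := by
      simpa [PySem.Chars.islower, Char.le_def, UInt32.le_iff_toNat_le] using hl
    obtain ⟨h97, h122⟩ := hl'
    refine ⟨?_, ?_, ?_⟩
    · simp [PySem.Chars.isspace]; omega
    · have : ¬ (c = '+' ∨ c = '-') := by
        rintro (rfl | rfl) <;> exact absurd h97 (by decide)
      simpa [pvIsOp] using this
    · simp [PySem.Chars.isdigit, Char.le_def, UInt32.le_iff_toNat_le]; omega
  · have hl0 : PySem.Chars.islower c = false := by simpa using hl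
    have hup : PySem.Chars.upperChar c = c := by simp [PySem.Chars.upperChar, hl0]
    have hc : c = 'I' ∨ c = 'V' ∨ c = 'X' ∨ c = 'L' ∨ c = 'C' ∨ c = 'D' ∨ c = 'M' := by
      simpa [pvIsRoman, pvRomanKeys, hup] using h
    rcases hc with rfl | rfl | rfl | rfl | rfl | rfl | rfl <;> exact ⟨by decide, by decide, by decide⟩

theorem pvKindOf_of_pred {k : Bool} {c : Char} (h : pvPred k c = true) :
    pvKindOf c = some (some k) := by
  cases k with
  | true =>
    have hd : PySem.Chars.isdigit c = true := by simpa [pvPred] using h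
    simp [pvKindOf, pvIsDigit_not_space hd, pvIsDigit_not_op hd, hd]
  | false =>
    have hr : pvIsRoman c = true := by simpa [pvPred] using h
    obtain ⟨h1, h2, h3⟩ := pvIsRoman_cases hr
    simp [pvKindOf, h1, h2, h3, hr]

theorem pvKindOf_inv {k : Bool} {c : Char} (h : pvKindOf c = some (some k)) :
    pvPred k c = true := by
  unfold pvKindOf at h
  split_ifs at h with h1 h2 h3 h4 <;> simp_all [pvPred]

-- flushing commutes with the step at a class boundary
theorem pvStep_flush {k : Bool} {c : Char} (h : pvKindOf c ≠ some (some k))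
    (tokens : List String) (run : List Char) :
    pvStepB (some (tokens, some (k, run))) c
      = pvStepB (some (tokens ++ [String.ofList run], none)) c := by
  unfold pvStepB
  cases hk : pvKindOf c with
  | none => rfl
  | some kd =>
    have hne : kd ≠ some k := by rintro rfl; exact h hk
    cases kd with
    | none => simp
    | some k' => simp [hne]

-- consuming a pending run: B's fold over cs with pending (k, run) equals flushing the
-- maximal pvPred-k prefix as one token and continuing on the rest
theorem pvRun (k : Bool) (cs : List Char) :
    ∀ (tokens : List String) (run : List Char),
      pvFlush (cs.foldl pvStepB (some (tokens, some (k, run)))) =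
      pvFlush ((cs.dropWhile (pvPred k)).foldl pvStepB
        (some (tokens ++ [String.ofList (run ++ (cs.takeWhile (pvPred k)).map (pvPiece k))], none))) := by
  induction cs with
  | nil => intro tokens run; simp [pvFlush]
  | cons c cs ih =>
    intro tokens run
    by_cases h : pvPred k c = true
    · have hk := pvKindOf_of_pred h
      have hstep : pvStepB (some (tokens, some (k, run))) c
          = some (tokens, some (k, run ++ [pvPiece k c])) := by
        simp [pvStepB, hk]
      rw [List.foldl_cons, hstep, ih]
      simp [h]
    · have hk : pvKindOf c ≠ some (some k) := fun hc => h (pvKindOf_inv hc)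
      rw [List.foldl_cons, pvStep_flush hk]
      simp [h]

-- the core correspondence: B's fold-and-flush equals A's scanner
theorem pvMain : ∀ (n : Nat) (cs : List Char), cs.length ≤ n → ∀ (tokens : List String),
    pvFlush (cs.foldl pvStepB (some (tokens, none))) = (pvTokA cs).map (tokens ++ ·) := by
  intro n
  induction n with
  | zero =>
    intro cs hcs tokens
    have : cs = [] := List.length_eq_zero_iff.mp (Nat.le_zero.mp hcs)
    subst this; simp [pvFlush, pvTokA]
  | succ m ih =>
    intro cs hcs tokens
    cases cs with
    | nil => simp [pvFlush, pvTokA]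
    | cons c rest =>
      have hrest : rest.length ≤ m := by simpa using hcs
      by_cases hs : PySem.Chars.isspace c = true
      · have hstep : pvStepB (some (tokens, none)) c = some (tokens, none) := by
          simp [pvStepB, pvKindOf, hs]
        rw [List.foldl_cons, hstep, ih rest hrest, pvTokA]
        simp [hs]
      · by_cases hop : pvIsOp c = true
        · have hstep : pvStepB (some (tokens, none)) c = some (tokens ++ [String.ofList [c]], none) := by
            simp [pvStepB, pvKindOf, hs, hop]
          rw [List.foldl_cons, hstep, ih rest hrest, pvTokA]
          simp [hs, hop, Option.map_map]
          rfl
        · by_cases hd : PySem.Chars.isdigit c = true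
          · have hstep : pvStepB (some (tokens, none)) c = some (tokens, some (true, [pvPiece true c])) := by
              simp [pvStepB, pvKindOf, hs, hop, hd]
            have hlen : (rest.dropWhile (pvPred true)).length ≤ m :=
              le_trans (List.length_dropWhile_le _ _) hrest
            rw [List.foldl_cons, hstep, pvRun, ih _ hlen, pvTokA]
            simp [hs, hop, hd, pvPred_true, pvPiece_true, Option.map_map]
            rfl
          · by_cases hr : pvIsRoman c = true
            · have hstep : pvStepB (some (tokens, none)) c = some (tokens, some (false, [pvPiece false c])) := by
                simp [pvStepB, pvKindOf, hs, hop, hd, hr]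
              have hlen : (rest.dropWhile (pvPred false)).length ≤ m :=
                le_trans (List.length_dropWhile_le _ _) hrest
              rw [List.foldl_cons, hstep, pvRun, ih _ hlen, pvTokA]
              simp [hs, hop, hd, hr, pvPred_false, pvPiece_false, Option.map_map]
              rfl
            · have hstep : pvStepB (some (tokens, none)) c = none := by
                simp [pvStepB, pvKindOf, hs, hop, hd, hr]
              rw [List.foldl_cons, hstep, pvFoldl_none, pvTokA]
              simp [hs, hop, hd, hr, pvFlush]

theorem pvCore (cs : List Char) :
    pvFlush (cs.foldl pvStepB (some ([], none))) = pvTokA cs := by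
  rw [pvMain cs.length cs le_rfl []]
  cases pvTokA cs <;> simp

-- ===== VERDICT (by name: the statement is the Claim_ definition above) =====
theorem safe_tokenize_py_spec : Claim_equal_safe_tokenize_py := by
  intro expr _ _
  unfold Spec_safe_tokenize_py safe_tokenize_py safe_tokenize_py_alt
  rw [pvCore]
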